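-- pv_equiv track=rewrite | github.com/PeterVanBeever/PyQuizBook | Lists/list1/list1.py | concat_list_indexwise
-- ===== SOURCE A (Python) =====
-- def concat_list_indexwise(lst1, lst2):
--     """
--     Write a program to add two lists index-wise.
--     Create a new list that contains the 0th index item from both the list,
--     then the 1st index item, and so on till the last element.
--     Any leftover items will get added at the end of the new list.
--     """
--     # concat_list =[index + x for index, x in zip(lst1, lst2)]
--     #find length of shorter list
--     min_len = min(len(lst1), len(lst2))
--     concat_list_indexwise = [lst1[i] + lst2[i] for i in range(min_len)]
--
--     if len(lst1) > len(lst2):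
--         concat_list_indexwise.extend(lst1[min_len:])
--     else:
--         concat_list_indexwise.extend(lst2[min_len:])
--
--     return concat_list_indexwise
-- ===== SOURCE B (Python) =====
-- def concat_list_indexwise(lst1, lst2):
--     # one consumption loop over paired iterators: no len/min/range, no indexing,
--     # no slicing, no separate tail pass -- leftovers fall out of whichever
--     # iterator is not yet exhausted
--     out = []
--     it1, it2 = iter(lst1), iter(lst2)
--     for x in it1:
--         try:
--             out.append(x + next(it2))
--         except StopIteration:
--             out.append(x)
--             break
--     out.extend(it1)
--     out.extend(it2)
--     return out
-- ===== Notes on version B (the rewrite author's own statement) =====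
-- stated objective: alternative
-- what changed: Replaces A's length/min/range index arithmetic, comprehension and explicit tail-extend of the longer list with a single consumption loop over two iterators that sums heads until one iterator raises StopIteration, after which the un-exhausted iterator drains as the leftover tail.
import Mathlib
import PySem

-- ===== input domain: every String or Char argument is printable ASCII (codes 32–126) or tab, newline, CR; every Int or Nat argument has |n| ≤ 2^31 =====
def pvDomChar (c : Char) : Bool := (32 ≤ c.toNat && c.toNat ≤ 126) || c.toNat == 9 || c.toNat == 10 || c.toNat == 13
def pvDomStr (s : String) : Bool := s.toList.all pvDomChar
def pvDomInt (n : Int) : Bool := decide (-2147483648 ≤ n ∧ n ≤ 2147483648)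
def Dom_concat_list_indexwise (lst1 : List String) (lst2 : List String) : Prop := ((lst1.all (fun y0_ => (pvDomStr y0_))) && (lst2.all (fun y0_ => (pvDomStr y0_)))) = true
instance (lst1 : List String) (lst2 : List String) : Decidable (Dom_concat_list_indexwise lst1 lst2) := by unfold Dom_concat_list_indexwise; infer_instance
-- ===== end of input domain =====

-- B replaces A's index/length arithmetic and tail-extend with one consumption loop over paired iterators (alternative decomposition, same linear cost).


-- ===== PORT A =====
-- build the sums over range(min_len), then extend with the longer list's tail (lst[min_len:] via PySem slice)
def concat_list_indexwise (lst1 : List String) (lst2 : List String) : List String :=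
  let min_len := min lst1.length lst2.length
  -- lst1[i] and lst2[i]: i < min_len is always in range, so getD "" is exact here
  let c := (List.range min_len).map (fun i => lst1.getD i "" ++ lst2.getD i "")
  if lst1.length > lst2.length then
    c ++ PySem.List.slice lst1 (some (min_len : Int)) none
  else
    c ++ PySem.List.slice lst2 (some (min_len : Int)) none

-- ===== PORT B =====
-- one consumption loop over both lists as the paired iterators: out accumulates x+next(it2);
-- when it2 raises StopIteration, append x and break; then drain whichever iterator remains
def concatAltGo (out : List String) : List String → List String → List String
  | [], lst2 => out ++ lst2                         -- for-loop over it1 ends; out.extend(it2)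
  | x :: t1, [] => (out ++ [x]) ++ t1               -- StopIteration: append x, break; out.extend(it1)
  | x :: t1, y :: t2 => concatAltGo (out ++ [x ++ y]) t1 t2   -- out.append(x + next(it2))

def concat_list_indexwise_alt (lst1 : List String) (lst2 : List String) : List String :=
  concatAltGo [] lst1 lst2

-- ===== PRECONDITION & SPEC =====
def Spec_concat_list_indexwise (lst1 : List String) (lst2 : List String) (out : List String) : Prop := out = concat_list_indexwise_alt lst1 lst2
instance (lst1 : List String) (lst2 : List String) (out : List String) : Decidable (Spec_concat_list_indexwise lst1 lst2 out) := by unfold Spec_concat_list_indexwise; infer_instance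

-- ===== CLAIM =====
def Claim_equal_concat_list_indexwise : Prop := ∀ (lst1 : List String) (lst2 : List String), Dom_concat_list_indexwise lst1 lst2 → Spec_concat_list_indexwise lst1 lst2 (concat_list_indexwise lst1 lst2)

-- ===== LEMMAS AND PROOFS =====
theorem concat_A_nil_left (lst2 : List String) : concat_list_indexwise [] lst2 = lst2 := by
  unfold concat_list_indexwise
  simp [PySem.List.slice_from_natCast]

theorem concat_A_nil_right (lst1 : List String) : concat_list_indexwise lst1 [] = lst1 := by
  unfold concat_list_indexwise
  cases lst1 with
  | nil => simp [PySem.List.slice_from_natCast]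
  | cons a t => simp [PySem.List.slice_from_natCast]

theorem concat_A_cons (a b : String) (t1 t2 : List String) :
    concat_list_indexwise (a :: t1) (b :: t2) = (a ++ b) :: concat_list_indexwise t1 t2 := by
  have hmin : min (a :: t1).length (b :: t2).length = min t1.length t2.length + 1 := by
    simp [Nat.succ_min_succ]
  by_cases h : t1.length > t2.length
  · have h' : (a :: t1).length > (b :: t2).length := by simp; omega
    simp only [concat_list_indexwise, hmin, h, h', if_pos, List.range_succ_eq_map,
      List.map_cons, List.map_map, List.getD_cons_zero, List.getD_cons_succ,
      Function.comp_def, PySem.List.slice_from_natCast, List.drop_succ_cons,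
      List.cons_append, Nat.succ_eq_add_one]
  · have h' : ¬ (a :: t1).length > (b :: t2).length := by simp; omega
    simp only [concat_list_indexwise, hmin, h, h', if_neg, not_false_iff,
      List.range_succ_eq_map, List.map_cons, List.map_map, List.getD_cons_zero,
      List.getD_cons_succ, Function.comp_def, PySem.List.slice_from_natCast,
      List.drop_succ_cons, List.cons_append, Nat.succ_eq_add_one]

theorem concatAltGo_eq : ∀ (lst1 lst2 out : List String),
    concatAltGo out lst1 lst2 = out ++ concat_list_indexwise lst1 lst2 := by
  intro lst1
  induction lst1 with
  | nil => intro lst2 out; rw [concat_A_nil_left]; rfl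
  | cons a t1 ih =>
    intro lst2 out
    cases lst2 with
    | nil => rw [concat_A_nil_right]; simp [concatAltGo]
    | cons b t2 => rw [concat_A_cons]; simp [concatAltGo, ih]

theorem concat_eq (lst1 lst2 : List String) :
    concat_list_indexwise lst1 lst2 = concat_list_indexwise_alt lst1 lst2 := by
  unfold concat_list_indexwise_alt
  rw [concatAltGo_eq]
  rfl

-- ===== VERDICT =====
theorem concat_list_indexwise_spec : Claim_equal_concat_list_indexwise := by
  intro lst1 lst2 _
  unfold Spec_concat_list_indexwise
  exact concat_eq lst1 lst2
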